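-- pv_equiv track=rewrite | github.com/z369437558/Leetcode | 2389.py | answerQueries
-- ===== SOURCE A (Python) =====
-- def answerQueries(nums: list[int], queries: list[int]) -> list[int]:
--     nums.sort()
--     ans=[]
--     presum=[nums[0]]
--     for i in range(1,len(nums)):
--         presum.append(presum[i-1]+nums[i])
--     for i in range(len(queries)):
--         left=0
--         right=len(nums)-1
--         while left<right:
--             mid =(left+right)//2+1
--             if presum[mid]<=queries[i]:
--                 left=mid
--             else:
--                 right=mid-1
--         if presum[left]<=queries[i]:
--             ans.append(left+1)
--         else:
--             ans.append(0)
--     return ans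
-- ===== SOURCE B (Python) =====
-- def answerQueries(nums: list[int], queries: list[int]) -> list[int]:
--     nums.sort()
--     presum = []
--     total = 0
--     for x in nums:
--         total += x
--         presum.append(total)
--
--     def locate(q, lo, hi):
--         if lo >= hi:
--             return lo + 1 if presum[lo] <= q else 0
--         mid = (lo + hi) // 2 + 1
--         if presum[mid] <= q:
--             return locate(q, mid, hi)
--         return locate(q, lo, mid - 1)
--
--     return [locate(q, 0, len(nums) - 1) for q in queries]
-- ===== Notes on version B (the rewrite author's own statement) =====
-- stated objective: simpler
-- what changed: Builds the prefix sums with a running total instead of indexed self-references, replaces the iterative left/right while-loop plus post-loop check by a recursive search that fuses the final presum[left]<=q test into its base case, and produces the answers with a comprehension over the queries instead of an index loop appending to an accumulator; Pre_ excludes only empty nums, where A raises IndexError.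
import Mathlib
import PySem

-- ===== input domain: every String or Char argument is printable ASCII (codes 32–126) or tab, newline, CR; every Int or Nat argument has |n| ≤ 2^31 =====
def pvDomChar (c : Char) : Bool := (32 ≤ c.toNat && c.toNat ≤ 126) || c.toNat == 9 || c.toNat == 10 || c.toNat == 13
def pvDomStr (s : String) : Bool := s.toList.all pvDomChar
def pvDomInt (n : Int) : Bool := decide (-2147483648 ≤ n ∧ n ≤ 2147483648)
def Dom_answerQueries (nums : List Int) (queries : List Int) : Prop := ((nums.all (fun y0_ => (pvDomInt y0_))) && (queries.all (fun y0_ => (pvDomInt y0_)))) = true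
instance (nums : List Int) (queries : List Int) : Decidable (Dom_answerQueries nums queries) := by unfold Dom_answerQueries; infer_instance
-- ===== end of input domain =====

-- B builds the prefix sums with a running total, fuses A's post-loop presum[left]<=q check into
-- the base case of a recursive search, and maps a comprehension over the queries (simpler
-- decomposition, same values). Both A and B sort `nums` in place; the equivalence proved here
-- is about the return value.

-- ===== PORT A =====
-- the `while left < right` binary-search loop of A, step for step
def pvBSearch (presum : List Int) (q : Int) (left right : Int) : Int :=
  if h : left < right then
    let mid := PySem.Int.floordiv (left + right) 2 + 1
    if PySem.List.pyGetD presum mid 0 ≤ q then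
      pvBSearch presum q mid right
    else
      pvBSearch presum q left (mid - 1)
  else left
termination_by (right - left).toNat
decreasing_by
  · have h2 : PySem.Int.floordiv (left + right) 2 = (left + right) / 2 := by
      simp [PySem.Int.floordiv, Int.fdiv_eq_ediv]
    simp only [h2]; omega
  · have h2 : PySem.Int.floordiv (left + right) 2 = (left + right) / 2 := by
      simp [PySem.Int.floordiv, Int.fdiv_eq_ediv]
    simp only [h2]; omega

def answerQueries (nums : List Int) (queries : List Int) : List Int :=
  let numsS := PySem.List.sorted nums (fun x => x) false
  let presum :=
    (PySem.List.pyRange 1 numsS.length 1).foldl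
      (fun ps i => ps ++ [PySem.List.pyGetD ps (i - 1) 0 + PySem.List.pyGetD numsS i 0])
      [PySem.List.pyGetD numsS 0 0]   -- nums[0]: IndexError on empty nums, excluded by Pre_
  (PySem.List.pyRange 0 queries.length 1).foldl
    (fun ans i =>
      let q := PySem.List.pyGetD queries i 0
      let left := pvBSearch presum q 0 ((numsS.length : Int) - 1)
      if PySem.List.pyGetD presum left 0 ≤ q then ans ++ [left + 1] else ans ++ [0])
    []

-- ===== PORT B =====
-- B's recursive `locate`, returning the per-query answer directly
def pvLocate (presum : List Int) (q : Int) (lo hi : Int) : Int :=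
  if h : lo ≥ hi then
    if PySem.List.pyGetD presum lo 0 ≤ q then lo + 1 else 0
  else
    let mid := PySem.Int.floordiv (lo + hi) 2 + 1
    if PySem.List.pyGetD presum mid 0 ≤ q then
      pvLocate presum q mid hi
    else
      pvLocate presum q lo (mid - 1)
termination_by (hi - lo).toNat
decreasing_by
  · have h2 : PySem.Int.floordiv (lo + hi) 2 = (lo + hi) / 2 := by
      simp [PySem.Int.floordiv, Int.fdiv_eq_ediv]
    simp only [h2]; omega
  · have h2 : PySem.Int.floordiv (lo + hi) 2 = (lo + hi) / 2 := by
      simp [PySem.Int.floordiv, Int.fdiv_eq_ediv]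
    simp only [h2]; omega

def answerQueries_alt (nums : List Int) (queries : List Int) : List Int :=
  let numsS := PySem.List.sorted nums (fun x => x) false
  let presum :=
    (numsS.foldl (fun (acc : List Int × Int) x => (acc.1 ++ [acc.2 + x], acc.2 + x)) ([], 0)).1
  queries.map (fun q => pvLocate presum q 0 ((numsS.length : Int) - 1))

-- ===== PRECONDITION & SPEC =====
-- Pre_ excludes exactly the empty nums, on which A raises IndexError at presum=[nums[0]].
def Pre_answerQueries (nums : List Int) (queries : List Int) : Prop := nums ≠ []
instance (nums : List Int) (queries : List Int) : Decidable (Pre_answerQueries nums queries) := by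
  unfold Pre_answerQueries; infer_instance

def pvWitness_answerQueries : List Int × List Int := ([4, -1, 2], [3, 10, 21, 0])

def Spec_answerQueries (nums : List Int) (queries : List Int) (out : List Int) : Prop := out = answerQueries_alt nums queries
instance (nums : List Int) (queries : List Int) (out : List Int) : Decidable (Spec_answerQueries nums queries out) := by unfold Spec_answerQueries; infer_instance

-- ===== CLAIM (what is proved, stated in full; the proofs are below) =====
def Claim_equal_answerQueries : Prop := ∀ (nums : List Int) (queries : List Int), Dom_answerQueries nums queries → Pre_answerQueries nums queries → Spec_answerQueries nums queries (answerQueries nums queries)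

-- ===== LEMMAS AND PROOFS =====

-- prefix sums of s starting from accumulator t
def pvPfx (t : Int) : List Int → List Int
  | [] => []
  | x :: xs => (t + x) :: pvPfx (t + x) xs

theorem pvPfx_getD (t : Int) (s : List Int) (i : Nat) (hi : i < s.length) :
    (pvPfx t s).getD i 0 = t + (s.take (i + 1)).sum := by
  induction s generalizing t i with
  | nil => simp at hi
  | cons x xs ih =>
    cases i with
    | zero => simp [pvPfx]
    | succ j =>
      simp only [pvPfx, List.getD_cons_succ, List.take_succ_cons, List.sum_cons]
      rw [ih (t + x) j (by simpa using hi)]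
      ring

theorem pvPfx_append_singleton (t : Int) (xs : List Int) (x : Int) :
    pvPfx t (xs ++ [x]) = pvPfx t xs ++ [t + xs.sum + x] := by
  induction xs generalizing t with
  | nil => simp [pvPfx]
  | cons y ys ih =>
    simp only [List.cons_append, pvPfx, ih, List.sum_cons]
    have : t + y + ys.sum + x = t + (y + ys.sum) + x := by ring
    rw [this]

-- A's presum-building loop computes the prefix sums of the sorted list
theorem pvPresumA (s : List Int) (hs : s ≠ []) (m : Nat) (h1 : 1 ≤ m)
    (hm : m ≤ s.length) :
    (PySem.List.pyRange 1 (m : Int) 1).foldl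
        (fun ps i => ps ++ [PySem.List.pyGetD ps (i - 1) 0 + PySem.List.pyGetD s i 0])
        [PySem.List.pyGetD s 0 0] = pvPfx 0 (s.take m) := by
  induction m with
  | zero => omega
  | succ n ih =>
    rcases Nat.lt_or_ge n 1 with hn | hn
    · have : n = 0 := by omega
      subst this
      rw [show ((1 : Nat) : Int) = 1 by norm_num, PySem.List.pyRange_one_eq_nil (by omega)]
      cases s with
      | nil => simp at hs
      | cons x xs => simp [pvPfx, PySem.List.pyGetD_zero]
    · have hcast : ((n + 1 : Nat) : Int) = (n : Int) + 1 := by push_cast; ring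
      rw [hcast, PySem.List.pyRange_one_succ_right (by exact_mod_cast hn), List.foldl_append,
        ih hn (by omega)]
      simp only [List.foldl_cons, List.foldl_nil]
      have hsub : ((n : Int)) - 1 = ((n - 1 : Nat) : Int) := by omega
      rw [hsub, PySem.List.pyGetD_natCast, PySem.List.pyGetD_natCast]
      have hlen : n < s.length := by omega
      rw [pvPfx_getD 0 (s.take n) (n - 1) (by simp; omega)]
      rw [List.take_take]
      have : min (n - 1 + 1) n = n := by omega
      rw [this]
      have hgd : s.getD n 0 = s[n] := List.getD_eq_getElem s 0 hlen
      rw [hgd]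
      have htake : s.take (n + 1) = s.take n ++ [s[n]] := by
        rw [List.take_add_one]
        simp [List.getElem?_eq_getElem hlen]
      rw [htake, pvPfx_append_singleton]

-- B's running-total fold computes the same prefix sums
theorem pvPresumB (s : List Int) (acc : List Int) (t : Int) :
    (s.foldl (fun (a : List Int × Int) x => (a.1 ++ [a.2 + x], a.2 + x)) (acc, t)).1 =
      acc ++ pvPfx t s := by
  induction s generalizing acc t with
  | nil => simp [pvPfx]
  | cons x xs ih =>
    simp only [List.foldl_cons]
    rw [ih]
    simp [pvPfx]

-- A's loop-then-check equals B's recursion with the check fused into the base case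
theorem pvLoc_eq (P : List Int) (q : Int) :
    ∀ k : Nat, ∀ l r : Int, (r - l).toNat ≤ k →
      (if PySem.List.pyGetD P (pvBSearch P q l r) 0 ≤ q then pvBSearch P q l r + 1 else 0) =
        pvLocate P q l r := by
  intro k
  induction k with
  | zero =>
    intro l r hk
    rw [pvBSearch, dif_neg (by omega), pvLocate, dif_pos (by omega)]
  | succ k ih =>
    intro l r hk
    by_cases hlr : l < r
    · rw [pvBSearch, dif_pos hlr, pvLocate, dif_neg (by omega)]
      have h2 : PySem.Int.floordiv (l + r) 2 = (l + r) / 2 := by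
        simp [PySem.Int.floordiv, Int.fdiv_eq_ediv]
      set mid := PySem.Int.floordiv (l + r) 2 + 1 with hmid
      have hmb : l < mid ∧ mid ≤ r := by rw [hmid, h2]; omega
      by_cases hc : PySem.List.pyGetD P mid 0 ≤ q
      · rw [if_pos hc, if_pos hc]
        exact ih mid r (by omega)
      · rw [if_neg hc, if_neg hc]
        exact ih l (mid - 1) (by omega)
    · rw [pvBSearch, dif_neg hlr, pvLocate, dif_pos (by omega)]

-- a fold that only ever appends one value per element is a map
theorem pvFoldCollect (step : List Int → Int → List Int) (v : Int → Int)
    (hstep : ∀ acc i, step acc i = acc ++ [v i]) :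
    ∀ (xs : List Int) (acc : List Int), xs.foldl step acc = acc ++ xs.map v := by
  intro xs
  induction xs with
  | nil => intro acc; simp
  | cons x xr ih =>
    intro acc
    simp only [List.foldl_cons, List.map_cons, hstep]
    rw [ih]
    simp

-- ===== VERDICT (by name: the statement is the Claim_ definition above) =====
theorem answerQueries_spec : Claim_equal_answerQueries := by
  intro nums queries _ hne
  unfold Spec_answerQueries
  simp only [answerQueries, answerQueries_alt]
  set S := PySem.List.sorted nums (fun x => x) false with hS
  have hSne : S ≠ [] := fun h => hne ((PySem.List.sorted_eq_nil_iff ..).mp h)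
  have hlen1 : 1 ≤ S.length := List.length_pos_of_ne_nil hSne
  have hA : (PySem.List.pyRange 1 (S.length : Int) 1).foldl
      (fun ps i => ps ++ [PySem.List.pyGetD ps (i - 1) 0 + PySem.List.pyGetD S i 0])
      [PySem.List.pyGetD S 0 0] = pvPfx 0 S := by
    have := pvPresumA S hSne S.length hlen1 le_rfl
    rwa [List.take_length] at this
  rw [hA, pvPresumB S [] 0, List.nil_append]
  rw [pvFoldCollect _
    (fun i => pvLocate (pvPfx 0 S) (PySem.List.pyGetD queries i 0) 0 ((S.length : Int) - 1))
    (fun acc i => by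
      beta_reduce
      rw [← pvLoc_eq (pvPfx 0 S) (PySem.List.pyGetD queries i 0)
        (((S.length : Int) - 1 - 0).toNat) 0 ((S.length : Int) - 1) le_rfl]
      split <;> rfl)
    (PySem.List.pyRange 0 (queries.length : Int) 1) [], List.nil_append]
  conv_rhs => rw [← PySem.List.map_pyGetD_pyRange_zero' queries 0]
  rw [List.map_map]
  rfl
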